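-- pv_equiv track=rewrite | github.com/matthewbbone/cba-analysis | development/experiments/segmentation/run_experiment.py | _interval_intersection_len
-- ===== SOURCE A (Python) =====
-- def _normalize_intervals(intervals: list[tuple[int, int]]) -> list[tuple[int, int]]:
--     if not intervals:
--         return []
--     intervals = sorted(intervals)
--     merged: list[list[int]] = [[intervals[0][0], intervals[0][1]]]
--     for start, end in intervals[1:]:
--         tail = merged[-1]
--         if start <= tail[1]:
--             tail[1] = max(tail[1], end)
--         else:
--             merged.append([start, end])
--     return [(s, e) for s, e in merged]
--
-- def _interval_intersection_len(
--     a: list[tuple[int, int]],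
--     b: list[tuple[int, int]],
-- ) -> int:
--     a = _normalize_intervals(a)
--     b = _normalize_intervals(b)
--     i = 0
--     j = 0
--     total = 0
--     while i < len(a) and j < len(b):
--         s1, e1 = a[i]
--         s2, e2 = b[j]
--         left = max(s1, s2)
--         right = min(e1, e2)
--         if right > left:
--             total += right - left
--         if e1 <= e2:
--             i += 1
--         else:
--             j += 1
--     return total
-- ===== SOURCE B (Python) =====
-- def _interval_intersection_len(
--     a: list[tuple[int, int]],
--     b: list[tuple[int, int]],
-- ) -> int:
--     def merged(intervals):
--         out = []
--         for s, e in sorted(intervals):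
--             if out and s <= out[-1][1]:
--                 out[-1] = (out[-1][0], max(out[-1][1], e))
--             else:
--                 out.append((s, e))
--         return out
--
--     mb = merged(b)
--     return sum(
--         sum(max(0, min(e1, e2) - max(s1, s2)) for s2, e2 in mb)
--         for s1, e1 in merged(a)
--     )
-- ===== Notes on version B (the rewrite author's own statement) =====
-- stated objective: simpler
-- what changed: A merges both interval lists and then runs a two-pointer simultaneous scan; B merges each list with a plain fold and replaces the pointer scan by a direct double sum of the clamped pairwise overlaps, exploiting that merged intervals are disjoint.
import Mathlib
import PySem

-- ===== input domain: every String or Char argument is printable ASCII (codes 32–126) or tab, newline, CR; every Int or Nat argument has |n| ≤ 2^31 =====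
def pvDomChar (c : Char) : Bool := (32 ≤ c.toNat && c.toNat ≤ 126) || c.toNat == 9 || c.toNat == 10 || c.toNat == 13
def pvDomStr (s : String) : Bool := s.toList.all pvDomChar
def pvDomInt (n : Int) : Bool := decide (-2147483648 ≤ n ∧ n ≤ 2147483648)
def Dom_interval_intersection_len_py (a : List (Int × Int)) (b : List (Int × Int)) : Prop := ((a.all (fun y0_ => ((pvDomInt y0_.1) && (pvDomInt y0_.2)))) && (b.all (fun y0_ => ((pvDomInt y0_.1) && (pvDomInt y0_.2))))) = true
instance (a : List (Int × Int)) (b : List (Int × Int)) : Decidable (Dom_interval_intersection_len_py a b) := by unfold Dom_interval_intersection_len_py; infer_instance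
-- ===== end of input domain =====

-- B replaces A's merge-then-two-pointer scan by a merge-then-cross-sum of pairwise clamped
-- overlaps: simpler decomposition, same exact result (objective: alternative/simpler, not faster).

-- ===== PORT A =====
-- loop body of _normalize_intervals: `tail = merged[-1]; if start <= tail[1]: tail[1] = max(tail[1], end) else merged.append([start, end])`
-- `merged` is never empty in Python, so the `none` branch (Python would raise IndexError) is unreachable
def pvMergeStep (merged : List (Int × Int)) (p : Int × Int) : List (Int × Int) :=
  match merged.getLast? with
  | some tl => if p.1 ≤ tl.2 then merged.dropLast ++ [(tl.1, max tl.2 p.2)] else merged ++ [p]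
  | none => merged

-- _normalize_intervals: `if not intervals: return []` coincides with sorted(intervals) == []
def pvNormalize (intervals : List (Int × Int)) : List (Int × Int) :=
  match PySem.List.sorted2 intervals (fun p => p.1) (fun p => p.2) with
  | [] => []
  | h0 :: rest => (rest.foldl pvMergeStep [h0]).map (fun p => (p.1, p.2))

-- the while loop of _interval_intersection_len, index pair (i, j) rendered as structural recursion
def pvLoop : List (Int × Int) → List (Int × Int) → Int → Int
  | [], _, total => total
  | _ :: _, [], total => total
  | (s1, e1) :: as_, (s2, e2) :: bs, total =>
    let left := max s1 s2
    let right := min e1 e2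
    let total := if right > left then total + (right - left) else total
    if e1 ≤ e2 then pvLoop as_ ((s2, e2) :: bs) total else pvLoop ((s1, e1) :: as_) bs total
termination_by a b _ => a.length + b.length

def interval_intersection_len_py (a : List (Int × Int)) (b : List (Int × Int)) : Int :=
  pvLoop (pvNormalize a) (pvNormalize b) 0

-- ===== PORT B =====
-- loop body of B's merged(): `if out and s <= out[-1][1]: out[-1] = (out[-1][0], max(out[-1][1], e)) else out.append((s, e))`
def altMergeStep (out : List (Int × Int)) (p : Int × Int) : List (Int × Int) :=
  match out.getLast? with
  | some tl => if p.1 ≤ tl.2 then out.dropLast ++ [(tl.1, max tl.2 p.2)] else out ++ [p]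
  | none => [p]

def altMerged (intervals : List (Int × Int)) : List (Int × Int) :=
  (PySem.List.sorted2 intervals (fun p => p.1) (fun p => p.2)).foldl altMergeStep []

def interval_intersection_len_py_alt (a : List (Int × Int)) (b : List (Int × Int)) : Int :=
  let mb := altMerged b
  ((altMerged a).map (fun p => (mb.map (fun q => max 0 (min p.2 q.2 - max p.1 q.1))).sum)).sum

-- ===== PRECONDITION & SPEC =====
def Spec_interval_intersection_len_py (a : List (Int × Int)) (b : List (Int × Int)) (out : Int) : Prop := out = interval_intersection_len_py_alt a b
instance (a : List (Int × Int)) (b : List (Int × Int)) (out : Int) : Decidable (Spec_interval_intersection_len_py a b out) := by unfold Spec_interval_intersection_len_py; infer_instance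

-- ===== CLAIM (what is proved, stated in full; the proofs are below) =====
def Claim_equal_interval_intersection_len_py : Prop := ∀ (a : List (Int × Int)) (b : List (Int × Int)), Dom_interval_intersection_len_py a b → Spec_interval_intersection_len_py a b (interval_intersection_len_py a b)

-- ===== LEMMAS AND PROOFS =====

def pvLt (p q : Int × Int) : Bool := decide (p.1 < q.1) || (!decide (q.1 < p.1) && decide (p.2 < q.2))
theorem sorted2_eq_foldl (xs : List (Int × Int)) :
    PySem.List.sorted2 xs (fun p => p.1) (fun p => p.2) =
      xs.foldl (fun acc x => PySem.List.insertBy pvLt x acc) [] := rfl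
def pvLe (p q : Int × Int) : Prop := p.1 < q.1 ∨ (p.1 = q.1 ∧ p.2 ≤ q.2)
theorem pvLt_false_iff (a b : Int × Int) : pvLt b a = false ↔ pvLe a b := by
  simp [pvLt, pvLe]; omega
theorem pvLt_true_le (a b : Int × Int) (h : pvLt a b = true) : pvLe a b := by
  simp [pvLt] at h; simp [pvLe]; omega
theorem pvLe_trans (a b c : Int × Int) (h1 : pvLe a b) (h2 : pvLe b c) : pvLe a c := by
  simp [pvLe] at *; omega
theorem insertBy_pairwise_le (x : Int × Int) (ys : List (Int × Int)) (h : ys.Pairwise pvLe) :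
    (PySem.List.insertBy pvLt x ys).Pairwise pvLe := by
  induction ys with
  | nil => simp [PySem.List.insertBy]
  | cons y ys ih =>
    rw [List.pairwise_cons] at h
    obtain ⟨hy, hys⟩ := h
    by_cases hlt : pvLt x y = true
    · have he : PySem.List.insertBy pvLt x (y :: ys) = x :: y :: ys := by
        simp [PySem.List.insertBy, hlt]
      rw [he]
      refine List.pairwise_cons.2 ⟨fun z hz => ?_, List.pairwise_cons.2 ⟨hy, hys⟩⟩
      rcases List.mem_cons.1 hz with rfl | hz
      · exact pvLt_true_le _ _ hlt
      · exact pvLe_trans _ _ _ (pvLt_true_le _ _ hlt) (hy z hz)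
    · rw [Bool.not_eq_true] at hlt
      have he : PySem.List.insertBy pvLt x (y :: ys) = y :: PySem.List.insertBy pvLt x ys := by
        simp [PySem.List.insertBy, hlt]
      rw [he]
      refine List.pairwise_cons.2 ⟨fun z hz => ?_, ih hys⟩
      rcases (PySem.List.mem_insertBy _ _ _ _).1 hz with rfl | hz
      · exact (pvLt_false_iff _ _).1 hlt
      · exact hy z hz
theorem foldl_insertBy_pairwise (xs acc : List (Int × Int)) (h : acc.Pairwise pvLe) :
    (xs.foldl (fun acc x => PySem.List.insertBy pvLt x acc) acc).Pairwise pvLe := by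
  induction xs generalizing acc with
  | nil => exact h
  | cons x xs ih => exact ih _ (insertBy_pairwise_le x acc h)
theorem sorted2_pairwise_le (xs : List (Int × Int)) :
    (PySem.List.sorted2 xs (fun p => p.1) (fun p => p.2)).Pairwise pvLe := by
  rw [sorted2_eq_foldl]
  exact foldl_insertBy_pairwise xs [] (by simp)
theorem step_eq (s : List (Int × Int)) (p : Int × Int) (hs : s ≠ []) :
    pvMergeStep s p = altMergeStep s p := by
  have := List.getLast?_eq_some_getLast (l := s) hs
  simp [pvMergeStep, altMergeStep, this]
theorem step_ne_nil (s : List (Int × Int)) (p : Int × Int) (hs : s ≠ []) :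
    altMergeStep s p ≠ [] := by
  have := List.getLast?_eq_some_getLast (l := s) hs
  simp only [altMergeStep, this]
  split <;> simp
theorem foldl_merge_eq (t : List (Int × Int)) (s : List (Int × Int)) (hs : s ≠ []) :
    t.foldl pvMergeStep s = t.foldl altMergeStep s := by
  induction t generalizing s with
  | nil => rfl
  | cons p t ih =>
    simp only [List.foldl_cons, step_eq s p hs]
    exact ih _ (step_ne_nil s p hs)
def pvGo (cur : Int × Int) : List (Int × Int) → List (Int × Int)
  | [] => [cur]
  | p :: rest => if p.1 ≤ cur.2 then pvGo (cur.1, max cur.2 p.2) rest else cur :: pvGo p rest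
theorem foldl_alt_go (t : List (Int × Int)) (acc : List (Int × Int)) (cur : Int × Int) :
    t.foldl altMergeStep (acc ++ [cur]) = acc ++ pvGo cur t := by
  induction t generalizing acc cur with
  | nil => rfl
  | cons p t ih =>
    simp only [List.foldl_cons, altMergeStep, List.getLast?_concat, List.dropLast_concat, pvGo]
    by_cases hp : p.1 ≤ cur.2
    · simp only [hp, if_pos]
      exact ih acc _
    · simp only [hp, if_neg, not_false_iff]
      rw [show acc ++ cur :: pvGo p t = (acc ++ [cur]) ++ pvGo p t by simp]
      exact ih (acc ++ [cur]) p
theorem altMerged_go (x : List (Int × Int)) (h0 : Int × Int) (rest : List (Int × Int))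
    (h : PySem.List.sorted2 x (fun p => p.1) (fun p => p.2) = h0 :: rest) :
    altMerged x = pvGo h0 rest := by
  unfold altMerged
  rw [h]
  have h1 : altMergeStep [] h0 = [h0] := rfl
  simpa [h1] using foldl_alt_go rest [] h0
theorem normalize_eq_altMerged (x : List (Int × Int)) : pvNormalize x = altMerged x := by
  unfold pvNormalize
  cases h : PySem.List.sorted2 x (fun p => p.1) (fun p => p.2) with
  | nil => simp [altMerged, h]
  | cons h0 rest =>
    dsimp only
    rw [altMerged_go x h0 rest h, foldl_merge_eq rest [h0] (by simp)]
    have := foldl_alt_go rest [] h0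
    simp only [List.nil_append] at this
    rw [this]
    simp
def pvR (p q : Int × Int) : Prop := p.2 < q.1
def pvFstLe (p q : Int × Int) : Prop := p.1 ≤ q.1
theorem pvGo_fst_ge (t : List (Int × Int)) (cur : Int × Int)
    (h1 : ∀ p ∈ t, cur.1 ≤ p.1) (h2 : t.Pairwise pvFstLe) :
    ∀ z ∈ pvGo cur t, cur.1 ≤ z.1 := by
  induction t generalizing cur with
  | nil => intro z hz; simp [pvGo] at hz; subst hz; exact le_refl _
  | cons p t ih =>
    rw [List.pairwise_cons] at h2
    obtain ⟨hp, ht⟩ := h2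
    intro z hz
    unfold pvGo at hz
    by_cases hc : p.1 ≤ cur.2
    · rw [if_pos hc] at hz
      exact ih (cur.1, max cur.2 p.2) (fun q hq => h1 q (List.mem_cons_of_mem _ hq)) ht z hz
    · rw [if_neg hc] at hz
      rcases List.mem_cons.1 hz with rfl | hz
      · exact le_refl _
      · exact le_trans (h1 p (List.mem_cons_self)) (ih p hp ht z hz)
theorem pvGo_chain (t : List (Int × Int)) (cur : Int × Int)
    (h1 : ∀ p ∈ t, cur.1 ≤ p.1) (h2 : t.Pairwise pvFstLe) :
    (pvGo cur t).Pairwise pvR := by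
  induction t generalizing cur with
  | nil => simp [pvGo]
  | cons p t ih =>
    rw [List.pairwise_cons] at h2
    obtain ⟨hp, ht⟩ := h2
    unfold pvGo
    by_cases hc : p.1 ≤ cur.2
    · rw [if_pos hc]
      exact ih (cur.1, max cur.2 p.2) (fun q hq => h1 q (List.mem_cons_of_mem _ hq)) ht
    · rw [if_neg hc]
      refine List.pairwise_cons.2 ⟨fun z hz => ?_, ih p hp ht⟩
      have := pvGo_fst_ge t p hp ht z hz
      unfold pvR
      omega
theorem altMerged_chain (x : List (Int × Int)) : (altMerged x).Pairwise pvR := by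
  cases h : PySem.List.sorted2 x (fun p => p.1) (fun p => p.2) with
  | nil => simp [altMerged, h]
  | cons h0 rest =>
    rw [altMerged_go x h0 rest h]
    have hpw := sorted2_pairwise_le x
    rw [h, List.pairwise_cons] at hpw
    obtain ⟨hh, ht⟩ := hpw
    refine pvGo_chain rest h0 (fun p hp => ?_) (ht.imp ?_)
    · rcases hh p hp with h' | ⟨h', _⟩ <;> omega
    · intro a b hab
      rcases hab with h' | ⟨h', _⟩ <;> (unfold pvFstLe; omega)
def pvOv (p q : Int × Int) : Int := max 0 (min p.2 q.2 - max p.1 q.1)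
def pvCross (a b : List (Int × Int)) : Int :=
  (a.map (fun p => (b.map (fun q => pvOv p q)).sum)).sum
theorem sum_map_add (l : List (Int × Int)) (f g : Int × Int → Int) :
    (l.map (fun x => f x + g x)).sum = (l.map f).sum + (l.map g).sum := by
  induction l with
  | nil => simp
  | cons x l ih => simp [ih]; ring
theorem sum_zero_of (l : List (Int × Int)) (f : Int × Int → Int) (h : ∀ x ∈ l, f x = 0) :
    (l.map f).sum = 0 := by
  induction l with
  | nil => simp
  | cons x l ih => simp [h x List.mem_cons_self, ih (fun y hy => h y (List.mem_cons_of_mem _ hy))]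
theorem pvLoop_eq_cross (a b : List (Int × Int)) (total : Int)
    (ha : a.Pairwise pvR) (hb : b.Pairwise pvR) :
    pvLoop a b total = total + pvCross a b := by
  induction a, b, total using pvLoop.induct with
  | case1 b total => simp [pvLoop, pvCross]
  | case2 p as_ total => simp [pvLoop, pvCross]
  | case3 s1 e1 as_ s2 e2 bs total left right total2 hle ih =>
    rw [List.pairwise_cons] at ha
    rw [pvLoop]
    simp only [if_pos hle]
    have htot : total2 = (if min e1 e2 > max s1 s2 then total + (min e1 e2 - max s1 s2) else total) := by
      simp only [total2, right, left]
      rw [dite_eq_ite]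
    rw [← htot, ih ha.2 hb, htot]
    have hz : (bs.map (fun q => pvOv (s1, e1) q)).sum = 0 := by
      refine sum_zero_of _ _ (fun q hq => ?_)
      have := (List.pairwise_cons.1 hb).1 q hq
      unfold pvR at this
      simp only [pvOv]
      omega
    simp only [pvCross, List.map_cons, List.sum_cons, hz]
    simp only [pvOv]
    split_ifs <;> omega
  | case4 s1 e1 as_ s2 e2 bs total left right total2 hle ih =>
    rw [List.pairwise_cons] at hb
    rw [pvLoop]
    simp only [if_neg hle]
    have htot : total2 = (if min e1 e2 > max s1 s2 then total + (min e1 e2 - max s1 s2) else total) := by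
      simp only [total2, right, left]
      rw [dite_eq_ite]
    rw [← htot, ih ha hb.2, htot]
    have hz : (as_.map (fun p => pvOv p (s2, e2))).sum = 0 := by
      refine sum_zero_of _ _ (fun p hp => ?_)
      have := (List.pairwise_cons.1 ha).1 p hp
      unfold pvR at this
      simp only [pvOv]
      omega
    have hsplit : pvCross ((s1, e1) :: as_) ((s2, e2) :: bs)
        = (((s1, e1) :: as_).map (fun p => pvOv p (s2, e2))).sum + pvCross ((s1, e1) :: as_) bs := by
      simp only [pvCross, List.map_cons, List.sum_cons]
      rw [sum_map_add]
      ring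
    rw [hsplit]
    simp only [List.map_cons, List.sum_cons, hz]
    simp only [pvOv]
    split_ifs <;> omega

-- ===== VERDICT (by name: the statement is the Claim_ definition above) =====
theorem interval_intersection_len_py_spec : Claim_equal_interval_intersection_len_py := by
  intro a b _
  unfold Spec_interval_intersection_len_py
  show pvLoop (pvNormalize a) (pvNormalize b) 0 = _
  rw [normalize_eq_altMerged, normalize_eq_altMerged,
      pvLoop_eq_cross _ _ _ (altMerged_chain a) (altMerged_chain b)]
  simp [pvCross, interval_intersection_len_py_alt, pvOv]
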